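-- pv_equiv track=rewrite | github.com/alanyang0819/CPE-Practice | 10922/main.py | solve
-- ===== SOURCE A (Python) =====
-- def solve(num, degree=0, already_nine=False):
--     sum = 0
--     for digit in num:
--         sum += int(digit)
--     if sum == 9:
--         if already_nine:
--             return degree
--         already_nine = True
--     if sum % 9 != 0:
--         return degree
--
--     else:
--         degree += 1
--         return solve(str(sum), degree, already_nine)
-- ===== SOURCE B (Python) =====
-- def solve(num, degree=0, already_nine=False):
--     s = sum(int(c) for c in num)
--     if s % 9 != 0:
--         return degree
--     t = 0
--     while s != 9:
--         s = sum(int(c) for c in str(s))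
--         t += 1
--     return degree + t + (0 if already_nine else 1)
-- ===== Notes on version B (the rewrite author's own statement) =====
-- stated objective: simpler
-- what changed: Replaces A's tail recursion threading the already_nine flag through string round-trips with a single %9 guard plus a plain while-loop that counts digit-sum iterations down to 9 and adds the count to degree in one closed expression.
import Mathlib
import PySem

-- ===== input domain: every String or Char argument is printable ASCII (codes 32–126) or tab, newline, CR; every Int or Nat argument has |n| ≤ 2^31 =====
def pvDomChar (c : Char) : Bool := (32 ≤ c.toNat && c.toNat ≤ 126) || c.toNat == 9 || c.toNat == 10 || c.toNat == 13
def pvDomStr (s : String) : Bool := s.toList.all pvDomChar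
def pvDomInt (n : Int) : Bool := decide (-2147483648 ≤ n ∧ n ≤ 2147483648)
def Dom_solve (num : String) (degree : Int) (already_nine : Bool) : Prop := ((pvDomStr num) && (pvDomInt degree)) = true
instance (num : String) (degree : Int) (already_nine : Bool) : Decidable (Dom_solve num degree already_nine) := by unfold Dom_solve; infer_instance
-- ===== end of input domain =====

-- B replaces A's tail recursion (flag threaded through string round-trips) by one guard plus an
-- explicit while-loop counting digit-sum iterations down to 9 (same cost; 'simpler' objective).

-- ===== PORT A =====
-- int(digit): a non-digit char is a ValueError (ofStr? = none); Pre_solve excludes such inputs,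
-- so the .getD 0 default is never taken on admitted inputs
def pvIntA (c : Char) : Int := (PySem.Int.ofStr? (String.singleton c)).getD 0

-- sum = 0; for digit in num: sum += int(digit)
def pvSumA (num : String) : Int := num.toList.foldl (fun acc c => acc + pvIntA c) 0

-- A's recursive body; the Nat argument is termination fuel only (across a recursive call the digit
-- sum never increases and strictly decreases whenever it is ≥ 10, so the fuel given in 'solve'
-- below is never exhausted on inputs satisfying Pre_solve)
def solveGo : Nat → String → Int → Bool → Int
  | 0, _, degree, _ => degree
  | fuel+1, num, degree, already_nine =>
    let s := pvSumA num
    if s = 9 ∧ already_nine then degree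
    else
      let an := if s = 9 then true else already_nine
      if PySem.Int.mod s 9 ≠ 0 then degree
      else solveGo fuel (PySem.Int.toStr s) (degree + 1) an

def solve (num : String) (degree : Int) (already_nine : Bool) : Int :=
  solveGo ((pvSumA num).toNat + 3) num degree already_nine

-- ===== PORT B =====
-- int(c) as in port A (Pre_solve admits only digit strings)
def pvIntB (c : Char) : Int := (PySem.Int.ofStr? (String.singleton c)).getD 0

-- s = sum(int(c) for c in num)
def pvSumB (num : String) : Int := (num.toList.map pvIntB).sum

-- while s != 9: s = sum(int(c) for c in str(s)); t += 1   — returns t; the Nat argument is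
-- termination fuel only (the loop is only entered with 0 < s and 9 ∣ s, where s.toNat steps suffice)
def pvLoopB : Nat → Int → Int
  | 0, _ => 0
  | fuel+1, s => if s = 9 then 0 else 1 + pvLoopB fuel (pvSumB (PySem.Int.toStr s))

def solve_alt (num : String) (degree : Int) (already_nine : Bool) : Int :=
  let s := pvSumB num
  if PySem.Int.mod s 9 ≠ 0 then degree
  else degree + pvLoopB s.toNat s + (if already_nine then 0 else 1)

-- ===== PRECONDITION & SPEC =====
-- Pre_ excludes exactly the inputs on which the Python A returns no value: a character outside
-- '0'..'9' (ValueError from int), or a string of only '0' characters / the empty string, whose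
-- digit sum is 0 — there A recurses forever (RecursionError) and B's while-loop never ends.
def Pre_solve (num : String) (degree : Int) (already_nine : Bool) : Prop :=
  (num.toList.all fun c => 48 ≤ c.toNat && c.toNat ≤ 57) = true ∧
  (num.toList.any fun c => c.toNat ≠ 48) = true
instance (num : String) (degree : Int) (already_nine : Bool) : Decidable (Pre_solve num degree already_nine) := by unfold Pre_solve; infer_instance

def pvWitness_solve : String × Int × Bool := ("18", 0, false)

def Spec_solve (num : String) (degree : Int) (already_nine : Bool) (out : Int) : Prop := out = solve_alt num degree already_nine
instance (num : String) (degree : Int) (already_nine : Bool) (out : Int) : Decidable (Spec_solve num degree already_nine out) := by unfold Spec_solve; infer_instance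

-- ===== CLAIM (what is proved, stated in full; the proofs are below) =====
def Claim_equal_solve : Prop := ∀ (num : String) (degree : Int) (already_nine : Bool), Dom_solve num degree already_nine → Pre_solve num degree already_nine → Spec_solve num degree already_nine (solve num degree already_nine)

-- ===== LEMMAS AND PROOFS =====

theorem pvIntB_eq : pvIntB = pvIntA := rfl

-- value of int(c) on the ten digit characters
theorem pvIntA_digitChar (n : Nat) (h : n < 10) : pvIntA (Nat.digitChar n) = (n : Int) := by
  interval_cases n <;> decide

theorem pvIntA_nonneg {c : Char} (h1 : 48 ≤ c.toNat) (h2 : c.toNat ≤ 57) : 0 ≤ pvIntA c := by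
  have hc : c = Char.ofNat c.toNat := (Char.ofNat_toNat c).symm
  have : c.toNat = 48 ∨ c.toNat = 49 ∨ c.toNat = 50 ∨ c.toNat = 51 ∨ c.toNat = 52 ∨
      c.toNat = 53 ∨ c.toNat = 54 ∨ c.toNat = 55 ∨ c.toNat = 56 ∨ c.toNat = 57 := by omega
  rcases this with h|h|h|h|h|h|h|h|h|h <;> rw [hc, h] <;> decide

theorem pvIntA_pos {c : Char} (h1 : 48 ≤ c.toNat) (h2 : c.toNat ≤ 57) (h3 : c.toNat ≠ 48) :
    1 ≤ pvIntA c := by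
  have hc : c = Char.ofNat c.toNat := (Char.ofNat_toNat c).symm
  have : c.toNat = 49 ∨ c.toNat = 50 ∨ c.toNat = 51 ∨ c.toNat = 52 ∨
      c.toNat = 53 ∨ c.toNat = 54 ∨ c.toNat = 55 ∨ c.toNat = 56 ∨ c.toNat = 57 := by omega
  rcases this with h|h|h|h|h|h|h|h|h <;> rw [hc, h] <;> decide

-- foldl accumulation = map-sum
theorem foldl_eq_map_sum (l : List Char) (a : Int) :
    l.foldl (fun acc c => acc + pvIntA c) a = a + (l.map pvIntA).sum := by
  induction l generalizing a with
  | nil => simp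
  | cons c t ih => simp [List.foldl, ih (a + pvIntA c)]; ring

theorem pvSumA_eq_pvSumB (num : String) : pvSumA num = pvSumB num := by
  simp [pvSumA, pvSumB, pvIntB_eq, foldl_eq_map_sum]

-- char digit sum of Nat.toDigitsCore = sum of Nat.digits
theorem toDigitsCore_sum : ∀ (n : Nat), ∀ (fuel : Nat) (ds : List Char), n < fuel →
    ((Nat.toDigitsCore 10 fuel n ds).map pvIntA).sum
      = ((Nat.digits 10 n).sum : Int) + ((ds.map pvIntA).sum) := by
  intro n
  induction n using Nat.strong_induction_on with
  | _ n ih =>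
    intro fuel ds hlt
    match fuel, hlt with
    | f+1, _ =>
      rw [Nat.toDigitsCore]
      by_cases hd : n / 10 = 0
      · simp only [hd]
        have hn10 : n < 10 := by omega
        rcases Nat.eq_zero_or_pos n with h0 | hp
        · subst h0; simp [pvIntA_digitChar 0 (by omega)]
        · rw [Nat.digits_def' (by norm_num : 1 < 10) hp, hd]
          simp [Nat.mod_eq_of_lt hn10, pvIntA_digitChar n hn10]
      · rw [if_neg hd]
        have hnp : 0 < n := by
          rcases Nat.eq_zero_or_pos n with h0 | hp
          · exfalso; apply hd; simp [h0]
          · exact hp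
        have hlt' : n / 10 < n := Nat.div_lt_self hnp (by norm_num)
        rw [ih (n / 10) hlt' f (Nat.digitChar (n % 10) :: ds) (by omega)]
        rw [Nat.digits_def' (by norm_num : 1 < 10) hnp]
        have hm : n % 10 < 10 := Nat.mod_lt _ (by norm_num)
        simp [pvIntA_digitChar (n % 10) hm]
        ring

-- digit sum of str(s) for positive s, as the Nat digits sum
theorem pvSumB_toStr (s : Int) (hs : 0 < s) :
    pvSumB (PySem.Int.toStr s) = ((Nat.digits 10 s.toNat).sum : Int) := by
  have h1 : (PySem.Int.toStr s).toList = PySem.Int.toChars s := PySem.Int.toList_toStr s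
  have h2 : PySem.Int.toChars s = Nat.toDigits 10 s.toNat := by
    unfold PySem.Int.toChars
    rw [if_neg (by omega)]
  rw [pvSumB, h1, h2, pvIntB_eq, Nat.toDigits,
    toDigitsCore_sum s.toNat (s.toNat + 1) [] (by omega)]
  simp

-- Nat digit-sum facts
theorem sum_digits_le : ∀ n : Nat, (Nat.digits 10 n).sum ≤ n := by
  intro n
  induction n using Nat.strong_induction_on with
  | _ n ih =>
    rcases Nat.eq_zero_or_pos n with h0 | hp
    · subst h0; simp
    · rw [Nat.digits_def' (by norm_num : 1 < 10) hp]
      have h1 : n / 10 < n := Nat.div_lt_self hp (by norm_num)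
      have h2 := ih (n / 10) h1
      have h3 := Nat.div_add_mod n 10
      simp only [List.sum_cons]
      omega

theorem sum_digits_pos : ∀ n : Nat, 0 < n → 0 < (Nat.digits 10 n).sum := by
  intro n
  induction n using Nat.strong_induction_on with
  | _ n ih =>
    intro hp
    rw [Nat.digits_def' (by norm_num : 1 < 10) hp]
    simp only [List.sum_cons]
    rcases Nat.eq_zero_or_pos (n % 10) with hm | hm
    · have hd : 0 < n / 10 := by
        have := Nat.div_add_mod n 10; omega
      have := ih (n / 10) (Nat.div_lt_self hp (by norm_num)) hd
      omega
    · omega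

theorem sum_digits_lt (n : Nat) (h : 10 ≤ n) : (Nat.digits 10 n).sum < n := by
  rw [Nat.digits_def' (by norm_num : 1 < 10) (by omega)]
  have h2 := sum_digits_le (n / 10)
  have h3 := Nat.div_add_mod n 10
  have h4 : 1 ≤ n / 10 := by omega
  have h5 : n % 10 < 10 := Nat.mod_lt _ (by norm_num)
  simp only [List.sum_cons]
  omega

theorem sum_digits_mod9 (n : Nat) : (Nat.digits 10 n).sum % 9 = n % 9 :=
  (Nat.modEq_nine_digits_sum n).symm

-- divisibility form of Python's 's % 9 != 0'
theorem mod9_ne_iff (s : Int) : (PySem.Int.mod s 9 ≠ 0) ↔ ¬ (9 ∣ s) := by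
  constructor
  · intro h hd; exact h ((PySem.Int.mod_eq_zero_iff_dvd s 9).mpr hd)
  · intro h hm; exact h ((PySem.Int.mod_eq_zero_iff_dvd s 9).mp hm)

-- facts about s' = digit sum of str(s)
theorem step_pos (s : Int) (hs : 0 < s) : 0 < pvSumB (PySem.Int.toStr s) := by
  rw [pvSumB_toStr s hs]
  exact_mod_cast sum_digits_pos s.toNat (by omega)

theorem step_lt (s : Int) (hs : 10 ≤ s) : pvSumB (PySem.Int.toStr s) < s := by
  rw [pvSumB_toStr s (by omega)]
  have := sum_digits_lt s.toNat (by omega)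
  omega

theorem step_dvd (s : Int) (hs : 0 < s) : 9 ∣ s ↔ 9 ∣ pvSumB (PySem.Int.toStr s) := by
  rw [pvSumB_toStr s hs]
  have hmod := sum_digits_mod9 s.toNat
  omega

-- a positive multiple of 9 other than 9 itself is at least 18
theorem ge18 {s : Int} (hpos : 0 < s) (hdvd : 9 ∣ s) (hne : s ≠ 9) : 18 ≤ s := by
  obtain ⟨m, rfl⟩ := hdvd
  omega

-- pvLoopB is independent of the fuel once the fuel is at least s.toNat
theorem pvLoopB_fuel : ∀ (k : Nat) (s : Int) (f1 f2 : Nat), 0 < s → 9 ∣ s →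
    s.toNat ≤ k → s.toNat ≤ f1 → s.toNat ≤ f2 → pvLoopB f1 s = pvLoopB f2 s := by
  intro k
  induction k with
  | zero => intro s f1 f2 hp _ hk _ _; omega
  | succ k ih =>
    intro s f1 f2 hp hd hk h1 h2
    obtain ⟨a, rfl⟩ : ∃ a, f1 = a + 1 := ⟨f1 - 1, by omega⟩
    obtain ⟨c, rfl⟩ : ∃ c, f2 = c + 1 := ⟨f2 - 1, by omega⟩
    rw [pvLoopB, pvLoopB]
    by_cases h9 : s = 9
    · simp [h9]
    · rw [if_neg h9, if_neg h9]
      have h18 : 18 ≤ s := ge18 hp hd h9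
      have hp' := step_pos s hp
      have hlt := step_lt s (by omega)
      have hd' := (step_dvd s hp).mp hd
      rw [ih (pvSumB (PySem.Int.toStr s)) a c hp' hd' (by omega) (by omega) (by omega)]

-- characterisation of A's recursion as B's closed expression
theorem mainA : ∀ (k : Nat) (s : Int) (num : String) (d : Int) (b : Bool) (fuel : Nat),
    pvSumA num = s → 0 < s → s.toNat ≤ k → s.toNat + 2 ≤ fuel →
    solveGo fuel num d b =
      if ¬ (9 ∣ s) then d else d + pvLoopB s.toNat s + (if b then 0 else 1) := by
  intro k
  induction k with
  | zero => intro s num d b fuel hsum hp hk _; omega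
  | succ k ih =>
    intro s num d b fuel hsum hp hk hfuel
    obtain ⟨f, rfl⟩ : ∃ f, fuel = f + 1 := ⟨fuel - 1, by omega⟩
    rw [solveGo]
    simp only [hsum]
    by_cases h9b : s = 9 ∧ b = true
    · obtain ⟨h9, hb⟩ := h9b
      subst h9; subst hb
      rw [if_pos (by simp),
        if_neg (show ¬¬((9:Int) ∣ 9) from not_not_intro ⟨1, by norm_num⟩)]
      have hl : pvLoopB (9 : Int).toNat 9 = 0 := by decide
      rw [hl]
      norm_num
    · rw [if_neg h9b]
      by_cases hdvd : 9 ∣ s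
      · rw [if_neg (show ¬(PySem.Int.mod s 9 ≠ 0) from not_not_intro
            ((PySem.Int.mod_eq_zero_iff_dvd s 9).mpr hdvd)),
          if_neg (show ¬¬(9 ∣ s) from not_not_intro hdvd)]
        by_cases h9 : s = 9
        · -- s = 9 and b = false: one more recursive call on "9" returns d + 1
          have hb : b = false := by
            cases b
            · rfl
            · exact absurd ⟨h9, rfl⟩ h9b
          subst h9; subst hb
          rw [if_pos rfl]
          obtain ⟨f', rfl⟩ : ∃ f', f = f' + 1 := ⟨f - 1, by
            have h9n : (9 : Int).toNat = 9 := by decide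
            omega⟩
          rw [solveGo]
          have hsum9 : pvSumA (PySem.Int.toStr 9) = 9 := by decide
          simp only [hsum9]
          rw [if_pos (by simp)]
          have hl : pvLoopB (9 : Int).toNat 9 = 0 := by decide
          rw [hl]
          norm_num
        · -- s ≥ 18: recurse with a strictly smaller digit sum
          rw [if_neg h9]
          have h18 : 18 ≤ s := ge18 hp hdvd h9
          have hsum' : pvSumA (PySem.Int.toStr s) = pvSumB (PySem.Int.toStr s) :=
            pvSumA_eq_pvSumB _
          have hp' : 0 < pvSumB (PySem.Int.toStr s) := step_pos s hp
          have hlt : pvSumB (PySem.Int.toStr s) < s := step_lt s (by omega)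
          have hd' : 9 ∣ pvSumB (PySem.Int.toStr s) := (step_dvd s hp).mp hdvd
          rw [ih (pvSumB (PySem.Int.toStr s)) (PySem.Int.toStr s) (d + 1) b f hsum' hp'
            (by omega) (by omega)]
          rw [if_neg (show ¬¬(9 ∣ pvSumB (PySem.Int.toStr s)) from not_not_intro hd')]
          obtain ⟨m, hm⟩ : ∃ m, s.toNat = m + 1 := ⟨s.toNat - 1, by omega⟩
          have hloop : pvLoopB s.toNat s = 1 + pvLoopB (pvSumB (PySem.Int.toStr s)).toNat
              (pvSumB (PySem.Int.toStr s)) := by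
            rw [hm, pvLoopB, if_neg h9]
            rw [pvLoopB_fuel (pvSumB (PySem.Int.toStr s)).toNat (pvSumB (PySem.Int.toStr s))
              m (pvSumB (PySem.Int.toStr s)).toNat hp' hd' (le_refl _) (by omega) (le_refl _)]
          rw [hloop]
          ring
      · rw [if_pos (show PySem.Int.mod s 9 ≠ 0 from (mod9_ne_iff s).mpr hdvd),
          if_pos (show ¬(9 ∣ s) from hdvd)]

-- positivity of the initial digit sum under Pre_
theorem sum_pos_of_pre : ∀ (l : List Char),
    (∀ c ∈ l, 48 ≤ c.toNat ∧ c.toNat ≤ 57) → (∃ c ∈ l, c.toNat ≠ 48) →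
    0 < (l.map pvIntA).sum := by
  intro l
  induction l with
  | nil => intro _ h; simp at h
  | cons c t ih =>
    intro hall hex
    have hc := hall c (by simp)
    have ht : ∀ x ∈ t, 48 ≤ x.toNat ∧ x.toNat ≤ 57 := fun x hx => hall x (by simp [hx])
    have htn : 0 ≤ (t.map pvIntA).sum := by
      apply List.sum_nonneg
      intro x hx
      simp only [List.mem_map] at hx
      obtain ⟨y, hy, rfl⟩ := hx
      exact pvIntA_nonneg (ht y hy).1 (ht y hy).2
    simp only [List.map_cons, List.sum_cons]
    by_cases hcz : c.toNat = 48
    · obtain ⟨x, hx, hxn⟩ := hex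
      rcases List.mem_cons.mp hx with rfl | hx'
      · exact absurd hcz hxn
      · have h1 := ih ht ⟨x, hx', hxn⟩
        have h2 := pvIntA_nonneg hc.1 hc.2
        omega
    · have h1 := pvIntA_pos hc.1 hc.2 hcz
      omega

-- ===== VERDICT (by name: the statement is the Claim_ definition above) =====
theorem solve_spec : Claim_equal_solve := by
  unfold Claim_equal_solve
  intro num degree already_nine _ hpre
  unfold Spec_solve solve solve_alt
  obtain ⟨hall', hex'⟩ := hpre
  have hall : ∀ c ∈ num.toList, 48 ≤ c.toNat ∧ c.toNat ≤ 57 := by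
    intro c hc
    simpa using List.all_eq_true.mp hall' c hc
  have hex : ∃ c ∈ num.toList, c.toNat ≠ 48 := by
    obtain ⟨c, hc, h⟩ := List.any_eq_true.mp hex'
    exact ⟨c, hc, by simpa using h⟩
  have hS : pvSumA num = pvSumB num := pvSumA_eq_pvSumB num
  have hpos : 0 < pvSumB num := by
    rw [pvSumB]
    rw [show (num.toList.map pvIntB) = (num.toList.map pvIntA) from by rw [pvIntB_eq]]
    exact sum_pos_of_pre num.toList hall hex
  rw [mainA (pvSumB num).toNat (pvSumB num) num degree already_nine _ hS hpos (le_refl _)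
    (by rw [hS]; omega)]
  by_cases hdvd : 9 ∣ pvSumB num
  · rw [if_neg (show ¬¬(9 ∣ pvSumB num) from not_not_intro hdvd),
      if_neg (show ¬(PySem.Int.mod (pvSumB num) 9 ≠ 0) from
        not_not_intro ((PySem.Int.mod_eq_zero_iff_dvd _ 9).mpr hdvd))]
  · rw [if_pos (show ¬(9 ∣ pvSumB num) from hdvd),
      if_pos ((mod9_ne_iff _).mpr hdvd)]
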